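-- pv_equiv track=rewrite | github.com/multi-swe-bench/MagentLess | get_repo_structure/get_repo_structure.py | check_file_ext
-- ===== SOURCE A (Python) =====
-- def check_file_ext(file_name, language):
--     exts = {
--         'cpp': ['h', 'hpp', 'hxx', 'c', 'cpp', 'cc', 'cxx'],
--         'typescript': ['js', 'ts'],
--     }
--     file_name = file_name.lower()
--     for ext in exts[language]:
--         if file_name.endswith(f'.{ext}'):
--             return True
--     return False
-- ===== SOURCE B (Python) =====
-- def check_file_ext(file_name, language):
--     if language == 'cpp':
--         valid = {'h', 'hpp', 'hxx', 'c', 'cpp', 'cc', 'cxx'}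
--     elif language == 'typescript':
--         valid = {'js', 'ts'}
--     else:
--         raise KeyError(language)
--     _, sep, suffix = file_name.lower().rpartition('.')
--     return bool(sep) and suffix in valid
-- ===== Notes on version B (the rewrite author's own statement) =====
-- stated objective: idiomatic
-- what changed: B drops the extension dictionary and the endswith loop entirely: it branches on the language to pick a literal set, splits off the filename's single actual extension once with rpartition('.'), and does one set-membership test.
import Mathlib
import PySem

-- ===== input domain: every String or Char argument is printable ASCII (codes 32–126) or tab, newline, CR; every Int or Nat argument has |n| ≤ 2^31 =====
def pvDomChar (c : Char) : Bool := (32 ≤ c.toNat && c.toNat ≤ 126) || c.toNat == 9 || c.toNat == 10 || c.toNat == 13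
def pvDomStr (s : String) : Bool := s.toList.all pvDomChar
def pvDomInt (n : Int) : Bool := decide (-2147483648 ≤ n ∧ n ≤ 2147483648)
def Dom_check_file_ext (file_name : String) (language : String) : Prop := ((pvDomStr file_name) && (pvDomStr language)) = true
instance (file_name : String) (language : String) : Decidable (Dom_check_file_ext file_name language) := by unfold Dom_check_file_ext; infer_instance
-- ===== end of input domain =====

-- B drops the extension dictionary and the endswith loop: it branches on the language to pick a
-- literal set, splits off the filename's single actual extension once, and does one membership test.
-- ===== PORT A =====
-- for-loop with early return True → List.any; f'.{ext}' is exactly '.' :: ext.toList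
def check_file_ext (file_name : String) (language : String) : Bool :=
  let exts : PySem.Dict String (List String) :=
    PySem.Dict.ofList [("cpp", ["h", "hpp", "hxx", "c", "cpp", "cc", "cxx"]),
                       ("typescript", ["js", "ts"])]
  let fn := PySem.Chars.lower file_name.toList
  (PySem.Dict.getD exts language []).any (fun ext => PySem.Chars.endswith fn ('.' :: ext.toList))

-- ===== PORT B =====
-- if/elif on the language selecting a set literal; the else branch raises KeyError in Python
-- (outside Pre_, so the port returns false there). rpartition('.') ported by hand (exact):
-- sep is nonempty iff '.' occurs, and the suffix is the maximal dot-free tail, i.e.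
-- takeWhile (≠ '.') of the reversed characters.
def check_file_ext_alt (file_name : String) (language : String) : Bool :=
  if language = "cpp" then
    cfeSuffixMem file_name
      (PySem.Set.ofList ["h".toList, "hpp".toList, "hxx".toList, "c".toList,
                         "cpp".toList, "cc".toList, "cxx".toList])
  else if language = "typescript" then
    cfeSuffixMem file_name (PySem.Set.ofList ["js".toList, "ts".toList])
  else
    false  -- Python B raises KeyError here; excluded by Pre_
where
  cfeSuffixMem (file_name : String) (valid : PySem.Set (List Char)) : Bool :=
    let r := (PySem.Chars.lower file_name.toList).reverse
    let suffix := (r.takeWhile (fun c => c ≠ '.')).reverse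
    r.contains '.' && PySem.Set.contains valid suffix

-- ===== PRECONDITION & SPEC =====
-- Pre_ excludes exactly the languages on which A's 'exts[language]' raises KeyError.
def Pre_check_file_ext (file_name : String) (language : String) : Prop :=
  language = "cpp" ∨ language = "typescript"
instance (file_name : String) (language : String) : Decidable (Pre_check_file_ext file_name language) := by unfold Pre_check_file_ext; infer_instance
def pvWitness_check_file_ext : String × String := ("main.CPP", "cpp")
def Spec_check_file_ext (file_name : String) (language : String) (out : Bool) : Prop := out = check_file_ext_alt file_name language
instance (file_name : String) (language : String) (out : Bool) : Decidable (Spec_check_file_ext file_name language out) := by unfold Spec_check_file_ext; infer_instance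

-- ===== CLAIM (what is proved, stated in full; the proofs are below) =====
def Claim_equal_check_file_ext : Prop := ∀ (file_name : String) (language : String), Dom_check_file_ext file_name language → Pre_check_file_ext file_name language → Spec_check_file_ext file_name language (check_file_ext file_name language)

-- ===== LEMMAS AND PROOFS =====

-- (f ++ ['.']) is a prefix of r, for dot-free f, iff r contains a dot and its maximal
-- dot-free prefix is exactly f.
lemma prefix_dot_iff (f : List Char) (hf : ('.' : Char) ∉ f) :
    ∀ r : List Char, ((f ++ ['.']) <+: r ↔ ('.' ∈ r ∧ r.takeWhile (fun c => c ≠ '.') = f)) := by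
  induction f with
  | nil =>
    intro r
    cases r with
    | nil => simp
    | cons c r' =>
      by_cases hc : c = '.'
      · subst hc; simp [List.takeWhile]
      · simp [List.takeWhile, hc, List.cons_prefix_cons, Ne.symm hc]
  | cons a f' ih =>
    intro r
    have ha : a ≠ '.' := fun h => hf (h ▸ List.mem_cons_self)
    have hf' : ('.' : Char) ∉ f' := fun h => hf (List.mem_cons_of_mem _ h)
    cases r with
    | nil => simp
    | cons c r' =>
      by_cases hc : c = a
      · subst hc
        simp [List.cons_prefix_cons, List.takeWhile, ha, ih hf' r', Ne.symm ha]
      · constructor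
        · rintro h
          rw [List.cons_append, List.cons_prefix_cons] at h
          exact absurd h.1.symm hc
        · rintro ⟨-, htw⟩
          exfalso
          by_cases hcd : c = '.'
          · subst hcd; simp [List.takeWhile] at htw
          · simp [List.takeWhile, hcd] at htw
            exact hc htw.1

-- endswith-with-a-dot, restated through the reversed character list.
lemma endswith_dot_iff (e l : List Char) (he : ('.' : Char) ∉ e) :
    PySem.Chars.endswith l ('.' :: e) = true ↔
      ('.' ∈ l.reverse ∧ l.reverse.takeWhile (fun c => c ≠ '.') = e.reverse) := by
  rw [PySem.Chars.endswith_iff]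
  have hrev : ('.' : Char) ∉ e.reverse := by simpa using he
  rw [← List.reverse_prefix, List.reverse_cons]
  exact prefix_dot_iff e.reverse hrev l.reverse

-- ===== VERDICT (by name: the statement is the Claim_ definition above) =====
set_option maxHeartbeats 1000000 in
theorem check_file_ext_spec : Claim_equal_check_file_ext := by
  intro file_name language _ hpre
  unfold Spec_check_file_ext check_file_ext check_file_ext_alt check_file_ext_alt.cfeSuffixMem
  rcases hpre with h | h <;> subst h <;> dsimp only
  · rw [show PySem.Dict.getD (PySem.Dict.ofList
        [("cpp", ["h", "hpp", "hxx", "c", "cpp", "cc", "cxx"]), ("typescript", ["js", "ts"])])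
        "cpp" [] = ["h", "hpp", "hxx", "c", "cpp", "cc", "cxx"] from by decide]
    rw [if_pos rfl, Bool.eq_iff_iff]
    simp only [List.any_cons, List.any_nil, Bool.or_eq_true, Bool.or_false,
      endswith_dot_iff "h".toList _ (by decide), endswith_dot_iff "hpp".toList _ (by decide),
      endswith_dot_iff "hxx".toList _ (by decide), endswith_dot_iff "c".toList _ (by decide),
      endswith_dot_iff "cpp".toList _ (by decide), endswith_dot_iff "cc".toList _ (by decide),
      endswith_dot_iff "cxx".toList _ (by decide),
      PySem.Set.ofList, PySem.Set.contains, Bool.and_eq_true,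
      List.contains_eq_mem, decide_eq_true_eq]
    rw [show List.foldl PySem.Set.add PySem.Set.empty
        ["h".toList, "hpp".toList, "hxx".toList, "c".toList, "cpp".toList, "cc".toList, "cxx".toList]
        = ["h".toList, "hpp".toList, "hxx".toList, "c".toList, "cpp".toList, "cc".toList, "cxx".toList]
        from by decide]
    simp only [List.mem_cons, List.not_mem_nil, or_false, List.reverse_eq_iff]
    tauto
  · rw [show PySem.Dict.getD (PySem.Dict.ofList
        [("cpp", ["h", "hpp", "hxx", "c", "cpp", "cc", "cxx"]), ("typescript", ["js", "ts"])])
        "typescript" [] = ["js", "ts"] from by decide]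
    rw [if_neg (by decide), if_pos rfl, Bool.eq_iff_iff]
    simp only [List.any_cons, List.any_nil, Bool.or_eq_true, Bool.or_false,
      endswith_dot_iff "js".toList _ (by decide), endswith_dot_iff "ts".toList _ (by decide),
      PySem.Set.ofList, PySem.Set.contains, Bool.and_eq_true,
      List.contains_eq_mem, decide_eq_true_eq]
    rw [show List.foldl PySem.Set.add PySem.Set.empty ["js".toList, "ts".toList]
        = ["js".toList, "ts".toList] from by decide]
    simp only [List.mem_cons, List.not_mem_nil, or_false, List.reverse_eq_iff]
    tauto
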